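-- pv_equiv track=rewrite | github.com/zoeezhang3/CodePath | session_3_unit_1.py | reveal_attendee_list_in_order
-- ===== SOURCE A (Python) =====
-- from collections import deque
--
-- def reveal_attendee_list_in_order(attendees):
--   attendees.sort(reverse=True)  # Sort in descending order (process largest first)
--   queue = deque()
--
--   for num in attendees:
--       if queue:
--           queue.appendleft(queue.pop())  # Simulate moving last element to front
--       queue.appendleft(num)  # Insert current number at the front
--
--   return list(queue)  # Convert deque to list
-- ===== SOURCE B (Python) =====
-- from collections import deque
--
-- def reveal_attendee_list_in_order(attendees):
--     attendees.sort(reverse=True)  # same in-place mutation as the original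
--     n = len(attendees)
--     result = [None] * n
--     slots = deque(range(n))
--     for num in reversed(attendees):  # cards in ascending order
--         idx = slots.popleft()
--         result[idx] = num
--         if slots:
--             slots.append(slots.popleft())  # rotate next slot to the back
--     return result
-- ===== Notes on version B (the rewrite author's own statement) =====
-- stated objective: alternative
-- what changed: A builds the arrangement backwards by prepending each card to a deque and moving the last element to the front; B simulates the reveal forwards, filling a preallocated result list through a rotating queue of slot indices.
import Mathlib
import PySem

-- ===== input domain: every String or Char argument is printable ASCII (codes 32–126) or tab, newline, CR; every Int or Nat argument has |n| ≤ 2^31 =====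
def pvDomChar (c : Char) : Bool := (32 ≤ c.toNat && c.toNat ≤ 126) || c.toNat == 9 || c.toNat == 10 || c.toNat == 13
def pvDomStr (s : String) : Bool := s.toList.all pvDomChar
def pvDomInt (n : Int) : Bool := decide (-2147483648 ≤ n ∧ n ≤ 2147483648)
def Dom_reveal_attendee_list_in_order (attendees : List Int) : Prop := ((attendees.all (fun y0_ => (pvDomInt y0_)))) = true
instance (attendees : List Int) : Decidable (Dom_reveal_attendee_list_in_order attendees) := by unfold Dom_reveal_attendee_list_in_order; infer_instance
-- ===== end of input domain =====

-- B replaces A's backward deque construction (prepend + move-last-to-front per card) by a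
-- forward simulation of the reveal: fill a preallocated result through a rotating queue of
-- slot indices (objective: alternative decomposition, same asymptotic cost).
-- A sorts `attendees` in place (descending); B performs the same mutation; the equivalence
-- proved here is about the return value.

-- ===== PORT A =====
-- 'if queue: queue.appendleft(queue.pop())' — move the last element to the front (no-op on empty)
def pvMoveLastFront (q : List Int) : List Int :=
  match q.getLast? with
  | some x => x :: q.dropLast
  | none => q

def reveal_attendee_list_in_order (attendees : List Int) : List Int :=
  -- attendees.sort(reverse=True); then the deque loop; list(queue) is the final state
  (PySem.List.sorted attendees (fun x => x) true).foldl
    (fun queue num => num :: pvMoveLastFront queue) []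

-- ===== PORT B =====
-- 'if slots: slots.append(slots.popleft())' — rotate the front slot index to the back
def pvRotate {α : Type} (q : List α) : List α :=
  match q with
  | [] => []
  | x :: xs => xs ++ [x]

-- the for-loop of Source B: pop a slot index, write the card there, rotate the next slot back
def pvFill (slots : List Nat) (vals : List Int) (result : List Int) : List Int :=
  match vals, slots with
  | [], _ => result
  | _ :: _, [] => result   -- unreachable: slots and vals always have equal length
  | v :: vs, i :: q => pvFill (pvRotate q) vs (result.set i v)

def reveal_attendee_list_in_order_alt (attendees : List Int) : List Int :=
  let s := PySem.List.sorted attendees (fun x => x) true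
  let n := s.length
  -- result = [None]*n in Source B; 0 is the placeholder, every slot is overwritten (proved below)
  pvFill (List.range n) s.reverse (List.replicate n 0)

-- ===== PRECONDITION & SPEC =====
def Spec_reveal_attendee_list_in_order (attendees : List Int) (out : List Int) : Prop := out = reveal_attendee_list_in_order_alt attendees
instance (attendees : List Int) (out : List Int) : Decidable (Spec_reveal_attendee_list_in_order attendees out) := by unfold Spec_reveal_attendee_list_in_order; infer_instance

-- ===== CLAIM (what is proved, stated in full; the proofs are below) =====
def Claim_equal_reveal_attendee_list_in_order : Prop := ∀ (attendees : List Int), Dom_reveal_attendee_list_in_order attendees → Spec_reveal_attendee_list_in_order attendees (reveal_attendee_list_in_order attendees)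

-- ===== LEMMAS AND PROOFS =====

theorem length_pvRotate {α : Type} (q : List α) : (pvRotate q).length = q.length := by
  cases q <;> simp [pvRotate]

-- the reveal order: take the front, rotate the new front to the back
def pvReveal (q : List Nat) : List Nat :=
  match q with
  | [] => []
  | x :: xs => x :: pvReveal (pvRotate xs)
termination_by q.length
decreasing_by simp [length_pvRotate]

-- A's loop, read right-to-left: the build recursion over the ascending card list
def pvBuild (vals : List Int) : List Int :=
  match vals with
  | [] => []
  | v :: vs => v :: pvMoveLastFront (pvBuild vs)

theorem pvMoveLastFront_concat (l : List Int) (x : Int) :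
    pvMoveLastFront (l ++ [x]) = x :: l := by
  simp [pvMoveLastFront]

theorem length_pvMoveLastFront (q : List Int) : (pvMoveLastFront q).length = q.length := by
  rcases List.eq_nil_or_concat q with h | ⟨l, x, h⟩ <;> subst h
  · rfl
  · rw [List.concat_eq_append, pvMoveLastFront_concat]
    simp

theorem length_pvBuild (vals : List Int) : (pvBuild vals).length = vals.length := by
  induction vals with
  | nil => rfl
  | cons v vs ih => simp [pvBuild, length_pvMoveLastFront, ih]

theorem foldlA_eq_pvBuild (s : List Int) :
    s.foldl (fun queue num => num :: pvMoveLastFront queue) [] = pvBuild s.reverse := by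
  have h : s = s.reverse.reverse := by simp
  rw [h, List.foldl_reverse]
  generalize s.reverse = l
  induction l with
  | nil => rfl
  | cons v vs ih => simp [pvBuild, ih]

theorem pvRotate_pvMoveLastFront (q : List Int) :
    pvRotate (pvMoveLastFront q) = q := by
  rcases List.eq_nil_or_concat q with h | ⟨l, x, h⟩ <;> subst h
  · rfl
  · rw [List.concat_eq_append, pvMoveLastFront_concat, pvRotate]

-- extracting values in reveal order from A's build recovers the ascending card list
def pvRevealI (q : List Int) : List Int :=
  match q with
  | [] => []
  | x :: xs => x :: pvRevealI (pvRotate xs)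
termination_by q.length
decreasing_by simp [length_pvRotate]

theorem pvRevealI_nil : pvRevealI [] = [] := by
  rw [pvRevealI.eq_def]

theorem pvRevealI_cons (x : Int) (xs : List Int) :
    pvRevealI (x :: xs) = x :: pvRevealI (pvRotate xs) := by
  rw [pvRevealI.eq_def]

theorem pvReveal_nil : pvReveal [] = [] := by
  rw [pvReveal.eq_def]

theorem pvReveal_cons (x : Nat) (xs : List Nat) :
    pvReveal (x :: xs) = x :: pvReveal (pvRotate xs) := by
  rw [pvReveal.eq_def]

theorem pvRevealI_pvBuild (vals : List Int) : pvRevealI (pvBuild vals) = vals := by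
  induction vals with
  | nil => rw [pvBuild, pvRevealI_nil]
  | cons v vs ih =>
    rw [pvBuild, pvRevealI_cons, pvRotate_pvMoveLastFront, ih]

theorem pvRevealI_map (g : Nat → Int) (q : List Nat) :
    pvRevealI (q.map g) = (pvReveal q).map g := by
  fun_induction pvReveal q with
  | case1 => simp [pvRevealI_nil]
  | case2 x xs ih =>
    rw [List.map_cons, pvRevealI_cons,
      show pvRotate (List.map g xs) = List.map g (pvRotate xs) from by cases xs <;> simp [pvRotate],
      ih, List.map_cons]

theorem pvReveal_perm (q : List Nat) : (pvReveal q).Perm q := by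
  fun_induction pvReveal q with
  | case1 => exact List.Perm.refl _
  | case2 x xs ih =>
    refine (List.Perm.cons x ih).trans (List.Perm.cons x ?_)
    cases xs with
    | nil => rfl
    | cons y ys => simp [pvRotate]

def pvWriteAll (pairs : List (Nat × Int)) (res : List Int) : List Int :=
  pairs.foldl (fun r p => r.set p.1 p.2) res

theorem pvFill_eq_writeAll (vals : List Int) :
    ∀ (slots : List Nat) (res : List Int), slots.length = vals.length →
    pvFill slots vals res = pvWriteAll ((pvReveal slots).zip vals) res := by
  induction vals with
  | nil => intro slots res _; cases slots <;> simp [pvFill, pvWriteAll, pvReveal_nil, pvReveal_cons]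
  | cons v vs ih =>
    intro slots res hlen
    cases slots with
    | nil => simp at hlen
    | cons i q =>
      rw [pvFill, pvReveal_cons, List.zip_cons_cons]
      rw [ih (pvRotate q) (res.set i v) (by rw [length_pvRotate]; simpa using hlen)]
      rfl

theorem pvWriteAll_getElem? (g : Nat → Int) (σ : List Nat) :
    ∀ (res : List Int) (j : Nat),
    (pvWriteAll (σ.map fun i => (i, g i)) res)[j]? =
      if j ∈ σ then (if j < res.length then some (g j) else none) else res[j]? := by
  induction σ with
  | nil => intro res j; simp [pvWriteAll]
  | cons i rest ih =>
    intro res j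
    have hstep : pvWriteAll ((i :: rest).map fun i => (i, g i)) res
        = pvWriteAll (rest.map fun i => (i, g i)) (res.set i (g i)) := rfl
    rw [hstep, ih]
    by_cases hjr : j ∈ rest
    · simp [hjr, List.mem_cons]
    · by_cases hji : j = i
      · subst hji
        simp [hjr, List.getElem?_set_self']
        split <;> simp_all
      · rw [List.getElem?_set_ne (show i ≠ j by omega)]
        simp [hjr, hji]

theorem zip_self_map {α β : Type} (σ : List α) (g : α → β) :
    σ.zip (σ.map g) = σ.map fun a => (a, g a) := by
  induction σ with
  | nil => rfl
  | cons a as ih => simp [ih]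

theorem map_getD_range (r : List Int) :
    (List.range r.length).map (fun i => r.getD i 0) = r := by
  apply List.ext_getElem (by simp)
  intro i h1 h2
  simp [List.getD_eq_getElem?_getD, List.getElem?_eq_getElem h2]

-- main bridge: the forward fill reproduces A's build, for any card list
theorem fill_eq_build (vals : List Int) :
    pvFill (List.range vals.length) vals (List.replicate vals.length 0) = pvBuild vals := by
  set n := vals.length with hn
  set r := pvBuild vals with hr
  have hrlen : r.length = n := length_pvBuild vals
  set g : Nat → Int := fun i => r.getD i 0 with hg
  have hvals : vals = (pvReveal (List.range n)).map g := by
    have h1 : r = (List.range n).map g := by rw [hg, ← hrlen, map_getD_range]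
    have h2 : pvRevealI r = vals := by rw [hr, pvRevealI_pvBuild]
    rw [← h2, h1, pvRevealI_map]
  have hperm := pvReveal_perm (List.range n)
  have hlen : (List.range n).length = vals.length := by simp [hn]
  rw [pvFill_eq_writeAll vals (List.range n) _ hlen]
  have hzip : (pvReveal (List.range n)).zip vals
      = (pvReveal (List.range n)).map fun i => (i, g i) := by
    conv_lhs => rw [hvals]
    exact zip_self_map _ g
  rw [hzip]
  apply List.ext_getElem?
  intro j
  rw [pvWriteAll_getElem? g]
  by_cases hj : j < n
  · have hjm : j ∈ pvReveal (List.range n) := hperm.mem_iff.mpr (by simp [hj])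
    simp [hjm, hj, hg, List.getD_eq_getElem?_getD, List.getElem?_eq_getElem (by omega : j < r.length)]
  · have hjm : j ∉ pvReveal (List.range n) := fun h => hj (by simpa using hperm.mem_iff.mp h)
    simp [hjm, List.getElem?_eq_none (by simp; omega : (List.replicate n (0:Int)).length ≤ j),
      List.getElem?_eq_none (by omega : r.length ≤ j)]

-- ===== VERDICT (by name: the statement is the Claim_ definition above) =====
theorem reveal_attendee_list_in_order_spec : Claim_equal_reveal_attendee_list_in_order := by
  intro attendees _
  unfold Spec_reveal_attendee_list_in_order
  unfold reveal_attendee_list_in_order reveal_attendee_list_in_order_alt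
  set s := PySem.List.sorted attendees (fun x => x) true with hs
  simp only
  rw [foldlA_eq_pvBuild]
  have h : s.length = s.reverse.length := by simp
  rw [h, fill_eq_build]
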